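-- pv_equiv track=rewrite | github.com/patty6339/Numbers_API_HNG12 | lambda_function.py | get_fun_fact
-- ===== SOURCE A (Python) =====
-- def is_prime(n):
--     if n < 2:
--         return False
--     for i in range(2, int(n ** 0.5) + 1):
--         if n % i == 0:
--             return False
--     return True
--
-- def is_perfect(n):
--     return n == sum(i for i in range(1, n) if n % i == 0)
--
-- def is_armstrong(n):
--     digits = [int(d) for d in str(n)]
--     power = len(digits)
--     return n == sum(d**power for d in digits)
--
-- def get_fun_fact(n):
--     if is_armstrong(n):
--         return f"{n} is an Armstrong number because {' + '.join([f'{d}^{len(str(n))}' for d in str(n)])} = {n}"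
--     elif is_prime(n):
--         return f"{n} is a prime number because it has only two divisors: 1 and itself."
--     elif is_perfect(n):
--         return f"{n} is a perfect number because the sum of its proper divisors equals the number."
--     else:
--         return f"{n} is just an interesting number!"
-- ===== SOURCE B (Python) =====
-- def get_fun_fact(n):
--     s = str(n)
--     k = len(s)
--     if n == sum((ord(c) - 48) ** k for c in s):
--         return f"{n} is an Armstrong number because {' + '.join(f'{c}^{k}' for c in s)} = {n}"
--     # aliquot sum (sum of proper divisors) via paired divisors up to sqrt(n)
--     total = 1
--     i = 2
--     while i * i <= n:
--         if n % i == 0: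
--             total += i
--             j = n // i
--             if j != i:
--                 total += j
--         i += 1
--     if total == 1:
--         return f"{n} is a prime number because it has only two divisors: 1 and itself."
--     if total == n:
--         return f"{n} is a perfect number because the sum of its proper divisors equals the number."
--     return f"{n} is just an interesting number!"
-- ===== Notes on version B (the rewrite author's own statement) =====
-- stated objective: faster
-- what changed: B replaces the O(n) proper-divisor sum (and the separate trial-division primality pass) with a single O(sqrt(n)) scan that collects paired divisors i and n//i, deciding prime (aliquot sum 1) and perfect (aliquot sum n) from the same total.
import Mathlib
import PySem

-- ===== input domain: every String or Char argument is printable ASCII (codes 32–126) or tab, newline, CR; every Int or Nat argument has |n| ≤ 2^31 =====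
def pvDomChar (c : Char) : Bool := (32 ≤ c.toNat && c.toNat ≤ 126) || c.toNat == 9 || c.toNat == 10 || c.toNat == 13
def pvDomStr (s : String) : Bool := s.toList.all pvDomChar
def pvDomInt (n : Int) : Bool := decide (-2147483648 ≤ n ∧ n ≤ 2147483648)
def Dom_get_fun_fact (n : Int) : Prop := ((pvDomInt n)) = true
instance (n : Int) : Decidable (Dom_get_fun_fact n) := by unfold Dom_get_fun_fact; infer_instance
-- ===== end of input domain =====

-- B computes the aliquot (proper-divisor) sum in one O(sqrt n) paired-divisor scan instead of
-- A's O(n) full scan plus a separate trial-division pass; return values agree on all n ≥ 0.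

-- ===== PORT A =====

-- int(n ** 0.5) ported as Nat.sqrt n.toNat: exact for 0 ≤ n ≤ 2^31 (double sqrt is correctly
-- rounded and cannot cross an integer there).
def pyIsPrime (n : Int) : Bool :=
  if n < 2 then false
  else (PySem.List.pyRange 2 ((Nat.sqrt n.toNat : Int) + 1) 1).all
    (fun i => !(PySem.Int.mod n i == 0))

def pyIsPerfect (n : Int) : Bool :=
  n == (PySem.List.pyRange 1 n 1).foldl
    (fun a i => if PySem.Int.mod n i == 0 then a + i else a) 0

-- int(d) for the chars d of str(n): exact for digit chars, i.e. for n ≥ 0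
-- (for n < 0 Python raises ValueError on '-'; Pre_ excludes those inputs).
def pyDigits (n : Int) : List Int :=
  (PySem.Int.toChars n).map (fun c => ((c.toNat : Int) - 48))

def pyIsArmstrong (n : Int) : Bool :=
  let digits := pyDigits n
  let power := digits.length
  n == (digits.map (fun d => d ^ power)).sum

def get_fun_fact (n : Int) : String :=
  if pyIsArmstrong n then
    PySem.Int.toStr n ++ " is an Armstrong number because " ++
      String.intercalate " + "
        ((PySem.Int.toChars n).map
          (fun d => String.ofList [d] ++ "^" ++ PySem.Int.toStr ((PySem.Int.toChars n).length : Int))) ++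
      " = " ++ PySem.Int.toStr n
  else if pyIsPrime n then
    PySem.Int.toStr n ++ " is a prime number because it has only two divisors: 1 and itself."
  else if pyIsPerfect n then
    PySem.Int.toStr n ++ " is a perfect number because the sum of its proper divisors equals the number."
  else
    PySem.Int.toStr n ++ " is just an interesting number!"

-- ===== PORT B =====

-- the while-loop of Source B: i runs while i*i <= n, collecting i and n//i for divisors i
def altLoop (n : Int) (i : Nat) (total : Int) : Int :=
  if h : (i : Int) * (i : Int) ≤ n then
    altLoop n (i + 1)
      (if PySem.Int.mod n (i : Int) == 0 then
        (let j := PySem.Int.floordiv n (i : Int)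
         if j ≠ (i : Int) then total + (i : Int) + j else total + (i : Int))
       else total)
  else total
termination_by n.toNat + 1 - i * i
decreasing_by
  have : i * i ≤ n.toNat := by
    have hn : ((i*i : Nat) : Int) ≤ n := by push_cast; exact h
    omega
  have : i * i < (i+1) * (i+1) := by nlinarith
  omega

def get_fun_fact_alt (n : Int) : String :=
  let cs := PySem.Int.toChars n
  let k := cs.length
  if n == (cs.map (fun c => ((c.toNat : Int) - 48) ^ k)).sum then
    PySem.Int.toStr n ++ " is an Armstrong number because " ++
      String.intercalate " + "
        (cs.map (fun c => String.ofList [c] ++ "^" ++ PySem.Int.toStr (k : Int))) ++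
      " = " ++ PySem.Int.toStr n
  else
    let total := altLoop n 2 1
    if total == 1 then
      PySem.Int.toStr n ++ " is a prime number because it has only two divisors: 1 and itself."
    else if total == n then
      PySem.Int.toStr n ++ " is a perfect number because the sum of its proper divisors equals the number."
    else
      PySem.Int.toStr n ++ " is just an interesting number!"

-- ===== PRECONDITION & SPEC =====
-- Pre_ excludes n < 0: there Python A raises ValueError (int('-') on the sign of str(n)).
def Pre_get_fun_fact (n : Int) : Prop := 0 ≤ n
instance (n : Int) : Decidable (Pre_get_fun_fact n) := by unfold Pre_get_fun_fact; infer_instance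
def pvWitness_get_fun_fact : Int := 28

def Spec_get_fun_fact (n : Int) (out : String) : Prop := out = get_fun_fact_alt n
instance (n : Int) (out : String) : Decidable (Spec_get_fun_fact n out) := by unfold Spec_get_fun_fact; infer_instance

-- ===== CLAIM (what is proved, stated in full; the proofs are below) =====
def Claim_equal_get_fun_fact : Prop :=
  ∀ (n : Int), Dom_get_fun_fact n → Pre_get_fun_fact n → Spec_get_fun_fact n (get_fun_fact n)

-- ===== LEMMAS AND PROOFS =====

def contribN (m i : Nat) : Nat := if m % i = 0 then i + (if m / i ≠ i then m / i else 0) else 0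

theorem pair_sum (m : Nat) (hm : 1 ≤ m) :
    ∑ d ∈ (m.divisors.filter (fun d => d ≤ Nat.sqrt m)).filter (fun d => m / d ≠ d), m / d
      = ∑ d ∈ m.divisors.filter (fun d => Nat.sqrt m < d), d := by
  set r := Nat.sqrt m with hr
  apply Finset.sum_nbij' (i := fun d => m / d) (j := fun d => m / d)
  · intro d hd
    simp only [Finset.mem_filter, Nat.mem_divisors] at hd ⊢
    obtain ⟨⟨⟨hdvd, hm0⟩, hdr⟩, hne⟩ := hd
    have hd0 : 0 < d := Nat.pos_of_dvd_of_pos hdvd (by omega)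
    have hmul : d * (m / d) = m := Nat.mul_div_cancel' hdvd
    refine ⟨⟨Nat.div_dvd_of_dvd hdvd, hm0⟩, ?_⟩
    by_contra hle
    push_neg at hle
    have h2 : r * r ≤ m := by have := Nat.sqrt_le' m; nlinarith
    have h1 : m ≤ r * r := by calc m = d * (m/d) := hmul.symm
                                   _ ≤ r * r := Nat.mul_le_mul hdr hle
    have hmrr : m = r * r := le_antisymm h1 h2
    have hdr' : d = r := by nlinarith [hmul]
    have : m / d = r := by nlinarith [hmul]
    omega
  · intro d hd
    simp only [Finset.mem_filter, Nat.mem_divisors] at hd ⊢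
    obtain ⟨⟨hdvd, hm0⟩, hrd⟩ := hd
    have hd0 : 0 < d := Nat.pos_of_dvd_of_pos hdvd (by omega)
    have hmul : (m / d) * d = m := Nat.div_mul_cancel hdvd
    have hdd : m / (m / d) = d := Nat.div_div_self hdvd hm0
    have hle : m / d ≤ r := by
      by_contra hgt
      push_neg at hgt
      have h3 : (r+1) * (r+1) ≤ m := by
        calc (r+1)*(r+1) ≤ (m/d) * d := Nat.mul_le_mul hgt hrd
             _ = m := hmul
      have h5 := Nat.lt_succ_sqrt m
      simp only [Nat.succ_eq_add_one, ← hr] at h5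
      omega
    exact ⟨⟨⟨Nat.div_dvd_of_dvd hdvd, hm0⟩, hle⟩, by omega⟩
  · intro d hd
    simp only [Finset.mem_filter, Nat.mem_divisors] at hd
    exact Nat.div_div_self hd.1.1.1 hd.1.1.2
  · intro d hd
    simp only [Finset.mem_filter, Nat.mem_divisors] at hd
    exact Nat.div_div_self hd.1.1 hd.1.2
  · intro d hd
    rfl


theorem full_pair (m : Nat) (hm : 1 ≤ m) :
    ∑ i ∈ Finset.Ico 1 (Nat.sqrt m + 1), contribN m i = ∑ d ∈ m.divisors, d := by
  set r := Nat.sqrt m with hr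
  have hfil : (Finset.Ico 1 (r + 1)).filter (fun i => m % i = 0)
      = m.divisors.filter (fun d => d ≤ r) := by
    ext d
    simp only [Finset.mem_filter, Finset.mem_Ico, Nat.mem_divisors]
    constructor
    · rintro ⟨⟨h1, h2⟩, h3⟩
      exact ⟨⟨Nat.dvd_iff_mod_eq_zero.2 h3, by omega⟩, by omega⟩
    · rintro ⟨⟨h1, h2⟩, h3⟩
      have hd0 : 0 < d := Nat.pos_of_dvd_of_pos h1 (by omega)
      exact ⟨⟨by omega, by omega⟩, Nat.dvd_iff_mod_eq_zero.1 h1⟩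
  calc ∑ i ∈ Finset.Ico 1 (r + 1), contribN m i
      = ∑ i ∈ (Finset.Ico 1 (r + 1)).filter (fun i => m % i = 0),
          (i + if m / i ≠ i then m / i else 0) := by
        rw [Finset.sum_filter]; apply Finset.sum_congr rfl; intro i _; simp [contribN]
    _ = ∑ i ∈ m.divisors.filter (fun d => d ≤ r), (i + if m / i ≠ i then m / i else 0) := by
        rw [hfil]
    _ = (∑ i ∈ m.divisors.filter (fun d => d ≤ r), i)
        + ∑ i ∈ (m.divisors.filter (fun d => d ≤ r)).filter (fun i => m / i ≠ i), m / i := by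
        simp [Finset.sum_add_distrib, Finset.sum_filter]
    _ = (∑ i ∈ m.divisors.filter (fun d => d ≤ r), i)
        + ∑ d ∈ m.divisors.filter (fun d => r < d), d := by rw [pair_sum m hm]
    _ = ∑ d ∈ m.divisors, d := by
        rw [← Finset.sum_filter_add_sum_filter_not m.divisors (fun d => d ≤ r)]
        simp [not_le]

theorem aliquot_eq (m : Nat) (hm : 1 ≤ m) :
    (∑ i ∈ Finset.Ico 1 m, if m % i = 0 then i else 0) + m = ∑ d ∈ m.divisors, d := by
  have hfil : (Finset.Ico 1 m).filter (fun i => m % i = 0) = m.divisors.erase m := by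
    ext d
    simp only [Finset.mem_filter, Finset.mem_Ico, Nat.mem_divisors, Finset.mem_erase]
    constructor
    · rintro ⟨⟨h1, h2⟩, h3⟩
      exact ⟨by omega, Nat.dvd_iff_mod_eq_zero.2 h3, by omega⟩
    · rintro ⟨h1, h2, h3⟩
      have hd0 : 0 < d := Nat.pos_of_dvd_of_pos h2 (by omega)
      have hdm : d ≤ m := Nat.le_of_dvd (by omega) h2
      exact ⟨⟨by omega, by omega⟩, Nat.dvd_iff_mod_eq_zero.1 h2⟩
  rw [← Finset.sum_filter, hfil]
  exact Finset.sum_erase_add m.divisors _ (Nat.mem_divisors_self m (by omega))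

-- B's total (1 + paired contributions over [2, sqrt m]) is A's proper-divisor sum
theorem total_eq (m : Nat) (hm : 2 ≤ m) :
    1 + ∑ i ∈ Finset.Ico 2 (Nat.sqrt m + 1), contribN m i
      = ∑ i ∈ Finset.Ico 1 m, if m % i = 0 then i else 0 := by
  have hr1 : 1 ≤ Nat.sqrt m := by
    have := Nat.sqrt_le_sqrt (show 1 ≤ m by omega)
    simpa using this
  have hsplit : ∑ i ∈ Finset.Ico 1 (Nat.sqrt m + 1), contribN m i
      = contribN m 1 + ∑ i ∈ Finset.Ico 2 (Nat.sqrt m + 1), contribN m i := by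
    rw [Finset.sum_eq_sum_Ico_succ_bot (by omega)]
  have hc1 : contribN m 1 = 1 + m := by
    unfold contribN
    simp only [Nat.mod_one, Nat.div_one]
    split_ifs <;> omega
  have h1 := full_pair m (by omega)
  have h2 := aliquot_eq m (by omega)
  rw [hc1] at hsplit
  omega

-- contribN is zero exactly when i is not a divisor (for i ≥ 2)
theorem contrib_zero_iff (m i : Nat) (hi : 2 ≤ i) : contribN m i = 0 ↔ m % i ≠ 0 := by
  simp only [contribN]
  split_ifs with h1 h2 <;> simp_all <;> omega

-- B's loop computes 'total + sum of paired-divisor contributions for j in [i, sqrt m]'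
theorem altLoop_eq (m : Nat) (fuel : Nat) : ∀ (i : Nat) (t : Int), Nat.sqrt m + 1 - i ≤ fuel →
    altLoop (m : Int) i t = t + ((∑ j ∈ Finset.Ico i (Nat.sqrt m + 1), contribN m j : Nat) : Int) := by
  induction fuel with
  | zero =>
    intro i t hf
    have hgt : Nat.sqrt m < i := by omega
    have hc : ¬ ((i : Int) * (i : Int) ≤ (m : Int)) := by
      have h2 : m < i * i := by have := (Nat.sqrt_lt').1 hgt; rw [pow_two] at this; exact this
      exact_mod_cast not_le.2 (by exact_mod_cast h2)
    rw [altLoop, dif_neg hc]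
    rw [Finset.Ico_eq_empty (by omega)]
    simp
  | succ fuel ih =>
    intro i t hf
    by_cases hc : ((i : Int) * (i : Int) ≤ (m : Int))
    · have hle : i ≤ Nat.sqrt m := Nat.le_sqrt.2 (by exact_mod_cast hc)
      rw [altLoop, dif_pos hc, ih (i+1) _ (by omega)]
      rw [Finset.sum_eq_sum_Ico_succ_bot (show i < Nat.sqrt m + 1 by omega)]
      simp only [PySem.Int.mod_natCast, PySem.Int.floordiv_natCast]
      by_cases hd : m % i = 0
      · rw [if_pos (by simp [hd])]
        by_cases he : m / i = i
        · rw [if_neg (by simp [he]), contribN, if_pos hd, if_neg (by simp [he])]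
          push_cast; ring
        · rw [if_pos (by exact_mod_cast he), contribN, if_pos hd, if_pos he]
          push_cast; ring
      · have hnd : ¬ ((i : Int) ∣ (m : Int)) := by
          rw [Int.natCast_dvd_natCast]
          exact fun hdvd => hd (Nat.dvd_iff_mod_eq_zero.1 hdvd)
        rw [if_neg (by simp [hnd]), contribN.eq_def]
        rw [if_neg hd]
        ring
    · have hgt : Nat.sqrt m < i := by
        by_contra hle
        exact hc (by exact_mod_cast Nat.le_sqrt.1 (by omega))
      rw [altLoop, dif_neg hc, Finset.Ico_eq_empty (by omega)]
      simp

-- A's perfect-sum loop equals the Ico sum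
theorem perfect_fold (m : Nat) : ∀ (b : Nat) (t : Int),
    (PySem.List.pyRange 1 (b : Int) 1).foldl
      (fun a i => if PySem.Int.mod (m : Int) i == 0 then a + i else a) t
    = t + ((∑ i ∈ Finset.Ico 1 b, if m % i = 0 then i else 0 : Nat) : Int) := by
  intro b
  induction b with
  | zero => intro t; rw [PySem.List.pyRange_one_eq_nil (by norm_num)]; simp
  | succ b ihb =>
    intro t
    by_cases hb : b = 0
    · subst hb
      rw [show ((0 + 1 : Nat) : Int) = 1 by norm_num, PySem.List.pyRange_one_eq_nil (by norm_num)]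
      simp
    · have h1b : 1 ≤ b := by omega
      rw [show ((b + 1 : Nat) : Int) = (b : Int) + 1 by push_cast; ring,
        PySem.List.pyRange_one_succ_right (by exact_mod_cast h1b), List.foldl_append, ihb t]
      simp only [List.foldl, PySem.Int.mod_natCast]
      rw [Finset.sum_Ico_succ_top h1b]
      by_cases hd : m % b = 0
      · rw [if_pos (by simp [hd]), if_pos hd]; push_cast; ring
      · have hnd : ¬ ((b : Int) ∣ (m : Int)) := by
          rw [Int.natCast_dvd_natCast]
          exact fun hdvd => hd (Nat.dvd_iff_mod_eq_zero.1 hdvd)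
        rw [if_neg (by simp [hnd]), if_neg hd]; push_cast; ring

-- A's trial-division primality test is 'no paired-divisor contribution' (for m ≥ 2)
theorem prime_iff (m : Nat) (hm : 2 ≤ m) :
    pyIsPrime (m : Int) = true ↔ (∑ j ∈ Finset.Ico 2 (Nat.sqrt m + 1), contribN m j) = 0 := by
  rw [pyIsPrime]
  rw [if_neg (by exact_mod_cast not_lt.2 (show (2:Int) ≤ m by exact_mod_cast hm))]
  rw [Int.toNat_natCast]
  rw [List.all_eq_true]
  rw [Finset.sum_eq_zero_iff]
  constructor
  · intro h j hj
    rw [Finset.mem_Ico] at hj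
    rw [contrib_zero_iff m j hj.1]
    have hmem : (j : Int) ∈ PySem.List.pyRange 2 ((Nat.sqrt m : Int) + 1) 1 := by
      rw [PySem.List.mem_pyRange_one]
      constructor <;> [exact_mod_cast hj.1; exact_mod_cast hj.2]
    have := h _ hmem
    simp only [PySem.Int.mod_natCast, Bool.not_eq_eq_eq_not, Bool.not_true, beq_eq_false_iff_ne] at this
    exact fun hc => this (by exact_mod_cast hc)
  · intro h i hi
    rw [PySem.List.mem_pyRange_one] at hi
    have h2i : (0:Int) ≤ i := by omega
    set j := i.toNat with hj
    have hij : (j : Int) = i := Int.toNat_of_nonneg h2i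
    have hjm : j ∈ Finset.Ico 2 (Nat.sqrt m + 1) := by
      rw [Finset.mem_Ico]; omega
    have := (contrib_zero_iff m j (by omega)).1 (h j hjm)
    rw [← hij]
    simp only [PySem.Int.mod_natCast, Bool.not_eq_eq_eq_not, Bool.not_true, beq_eq_false_iff_ne]
    exact_mod_cast this

-- A's Armstrong test equals B's Armstrong condition
theorem arm_eq (n : Int) :
    pyIsArmstrong n
      = (n == ((PySem.Int.toChars n).map
          (fun c => ((c.toNat : Int) - 48) ^ (PySem.Int.toChars n).length)).sum) := by
  simp [pyIsArmstrong, pyDigits, List.map_map, Function.comp_def]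

-- every one-digit nonnegative number is an Armstrong number
theorem arm_small (m : Nat) (h : m < 10) : pyIsArmstrong (m : Int) = true := by
  interval_cases m <;> decide

theorem get_fun_fact_spec : Claim_equal_get_fun_fact := by
  intro n _ hpre
  unfold Spec_get_fun_fact
  obtain ⟨m, rfl⟩ : ∃ m : Nat, n = (m : Int) := ⟨n.toNat, (Int.toNat_of_nonneg hpre).symm⟩
  have harm := arm_eq ((m : Int))
  by_cases ha : pyIsArmstrong ((m : Int)) = true
  · have hb : ((m : Int) == ((PySem.Int.toChars (m : Int)).map
        (fun c => ((c.toNat : Int) - 48) ^ (PySem.Int.toChars (m : Int)).length)).sum) = true := by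
      rw [← harm]; exact ha
    simp only [get_fun_fact, get_fun_fact_alt, ha, hb, if_true]
  · have ha' : pyIsArmstrong ((m : Int)) = false := Bool.not_eq_true _ ▸ (by simpa using ha)
    have hb : ((m : Int) == ((PySem.Int.toChars (m : Int)).map
        (fun c => ((c.toNat : Int) - 48) ^ (PySem.Int.toChars (m : Int)).length)).sum) = false := by
      rw [← harm]; exact ha'
    have hm2 : 2 ≤ m := by
      by_contra hlt
      exact ha (arm_small m (by omega))
    have htot : altLoop ((m : Int)) 2 1
        = (((1 + ∑ j ∈ Finset.Ico 2 (Nat.sqrt m + 1), contribN m j : Nat) : Int)) := by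
      rw [altLoop_eq m (Nat.sqrt m + 1) 2 1 (by omega)]
      push_cast
      ring
    have hprime : pyIsPrime ((m : Int)) = (altLoop ((m : Int)) 2 1 == 1) := by
      by_cases hp : (∑ j ∈ Finset.Ico 2 (Nat.sqrt m + 1), contribN m j) = 0
      · rw [(prime_iff m hm2).2 hp, htot, hp]
        norm_num
      · have h1 : pyIsPrime ((m : Int)) = false := by
          rcases Bool.eq_false_or_eq_true (pyIsPrime ((m : Int))) with h | h
          · exact absurd ((prime_iff m hm2).1 h) hp
          · exact h
        rw [h1, htot]
        symm
        rw [beq_eq_false_iff_ne]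
        intro hcontra
        have : (1 + ∑ j ∈ Finset.Ico 2 (Nat.sqrt m + 1), contribN m j) = 1 := by
          exact_mod_cast hcontra
        omega
    have hperf : pyIsPerfect ((m : Int)) = (altLoop ((m : Int)) 2 1 == (m : Int)) := by
      have ht := total_eq m hm2
      rw [pyIsPerfect, perfect_fold m m 0, htot, Bool.eq_iff_iff]
      simp only [beq_iff_eq]
      constructor <;> intro h <;> omega
    simp only [get_fun_fact, get_fun_fact_alt, ha', hb, Bool.false_eq_true, if_false, hprime, hperf]
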